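-- pv_equiv track=rewrite | github.com/Intelligencebox-repo/intelligencebox-plugins | servers/mcp-verifica-codici/src/verifica_codici/script5.py | verifica_codici
-- ===== SOURCE A (Python) =====
-- def verifica_codici(codice_da_elenco, codice_immagine):
--     """
--     Confronta i dati attesi di un documento con una stringa di codice estratta.
--
--     Args:
--         codice_da_elenco (dict): Il dizionario con i dati originali del documento d'elenco.
--         codice_immagine (str): La stringa estratta dalla box partendo dalla foto (es. "ADRPMV02-PEDSIE-RRT00-1").
--
--     Returns:
--         dict: Un dizionario con lo stato della verifica ('OK' o 'FAILED') e i dettagli.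
--     """
--
--     # ---STEP 1: Pulisce il codice estratto dal file d'elenco ---
--     # Questi sono i campi che devono essere uniti
--     campi_da_unire = [
--         'commessa', 'lotto', 'fase', 'capitolo', 'paragrafo', 'WBS',
--         'parte d-opera', 'tipologia', 'disciplina', 'progressivo', 'revisione', 'scala'
--     ]
--
--     # Pulisce il codice estratto
--     codice_completo_elenco = []
--     for campo in campi_da_unire:
--         valore = str(codice_da_elenco.get(campo, ''))
--         # Aggiunge il valore solo se non è un segnaposto vuoto
--         if valore not in ['-', '/']:
--             codice_completo_elenco.append(valore)
--
--     stringa_codice_completo_elenco = "".join(codice_completo_elenco)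
--
--
--     # --- STEP 2: Pulisce il codice estratto dalla foto ---
--     stringa_codice_immagine = codice_immagine.replace('-', '').replace(' ', '')
--
--
--     # --- STEP 3: Confronta e restituisce il risultato ---
--     status = 'OK' # Default
--     lunghezza_elenco = len(stringa_codice_completo_elenco)
--     lunghezza_immagine = len(stringa_codice_immagine)
--
--     # Controllo preliminare sulla lunghezza
--     if lunghezza_elenco != lunghezza_immagine:
--         status = 'FAILED'
--     else:
--         # Confronto carattere per carattere
--         for i in range(lunghezza_immagine):
--             char_elenco = stringa_codice_completo_elenco[i]
--             char_immagine = stringa_codice_immagine[i]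
--
--             if char_elenco == char_immagine:
--                 continue
--
--             # Se sono diversi, controlla se è l'ambiguità O/0
--             elif (char_elenco == 'O' and char_immagine == '0') or \
--                  (char_elenco == '0' and char_immagine == 'O'):
--                 continue # Considera O e 0 come uguali
--
--             else:
--                 status = 'FAILED'
--                 break
--
--     # Prepara il risultato
--     risultato = {
--         'titolo_documento': codice_da_elenco.get('titolo'),
--         'codice_atteso': stringa_codice_completo_elenco,
--         'codice_estratto': stringa_codice_immagine,
--         'status': status
--     }
--
--     return risultato
-- ===== SOURCE B (Python) =====
-- def verifica_codici(codice_da_elenco, codice_immagine):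
--     campi_da_unire = [
--         'commessa', 'lotto', 'fase', 'capitolo', 'paragrafo', 'WBS',
--         'parte d-opera', 'tipologia', 'disciplina', 'progressivo', 'revisione', 'scala'
--     ]
--     expected = "".join(
--         v for v in (str(codice_da_elenco.get(c, '')) for c in campi_da_unire)
--         if v not in ('-', '/')
--     )
--     extracted = codice_immagine.replace('-', '').replace(' ', '')
--     # O and 0 are ambiguous in OCR: compare the two strings with O normalized to 0.
--     status = 'OK' if expected.replace('O', '0') == extracted.replace('O', '0') else 'FAILED'
--     return {
--         'titolo_documento': codice_da_elenco.get('titolo'),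
--         'codice_atteso': expected,
--         'codice_estratto': extracted,
--         'status': status,
--     }
-- ===== Notes on version B (the rewrite author's own statement) =====
-- stated objective: simpler
-- what changed: Replaces A's explicit length pre-check and index-by-index comparison loop with O/0 special cases by normalizing both strings with replace('O','0') and a single equality test; the expected string is built by a comprehension instead of a conditional-append loop.
import Mathlib
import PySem

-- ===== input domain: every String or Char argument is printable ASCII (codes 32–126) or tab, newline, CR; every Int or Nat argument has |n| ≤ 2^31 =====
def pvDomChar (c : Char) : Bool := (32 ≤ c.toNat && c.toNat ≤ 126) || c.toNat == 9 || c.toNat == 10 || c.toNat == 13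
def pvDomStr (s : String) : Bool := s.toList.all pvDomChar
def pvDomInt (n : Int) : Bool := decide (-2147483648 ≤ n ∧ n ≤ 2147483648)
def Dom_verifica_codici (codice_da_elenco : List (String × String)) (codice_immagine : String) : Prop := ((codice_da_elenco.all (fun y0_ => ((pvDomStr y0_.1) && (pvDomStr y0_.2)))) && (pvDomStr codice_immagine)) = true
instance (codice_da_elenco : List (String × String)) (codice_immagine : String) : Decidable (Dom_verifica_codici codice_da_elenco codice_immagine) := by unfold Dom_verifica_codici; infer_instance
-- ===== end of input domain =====

-- B replaces A's length pre-check and index loop with O/0 special cases by a normalize-(O→0)-and-compare; objective: simpler.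

def pvCampi : List String := [
  "commessa", "lotto", "fase", "capitolo", "paragrafo", "WBS",
  "parte d-opera", "tipologia", "disciplina", "progressivo", "revisione", "scala"]

-- ===== PORT A =====
-- A's character-comparison loop with `continue`/`break`: recursion over the index list, "FAILED" = break
def pvLoopA (se si : List Char) : List Int → String
  | [] => "OK"
  | i :: rest =>
    let ce := PySem.List.pyGetD se i ' '
    let ci := PySem.List.pyGetD si i ' '
    if ce = ci then pvLoopA se si rest
    else if (ce = 'O' ∧ ci = '0') ∨ (ce = '0' ∧ ci = 'O') then pvLoopA se si rest
    else "FAILED"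

def verifica_codici (codice_da_elenco : List (String × String)) (codice_immagine : String) : List (String × Option String) :=
  let dd := PySem.Dict.ofList codice_da_elenco
  let codice_completo_elenco := pvCampi.foldl (fun acc campo =>
      let valore := dd.getD campo ""
      if valore = "-" ∨ valore = "/" then acc else acc ++ [valore]) []
  let stringa_codice_completo_elenco := PySem.Str.join "" codice_completo_elenco
  let stringa_codice_immagine := PySem.Str.replace (PySem.Str.replace codice_immagine "-" "") " " ""
  let lunghezza_elenco := PySem.Str.len stringa_codice_completo_elenco
  let lunghezza_immagine := PySem.Str.len stringa_codice_immagine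
  let status :=
    if lunghezza_elenco ≠ lunghezza_immagine then "FAILED"
    else pvLoopA stringa_codice_completo_elenco.toList stringa_codice_immagine.toList
          (PySem.List.pyRange 0 lunghezza_immagine)
  [("titolo_documento", dd.get? "titolo"),
   ("codice_atteso", some stringa_codice_completo_elenco),
   ("codice_estratto", some stringa_codice_immagine),
   ("status", some status)]

-- ===== PORT B =====
def verifica_codici_alt (codice_da_elenco : List (String × String)) (codice_immagine : String) : List (String × Option String) :=
  let dd := PySem.Dict.ofList codice_da_elenco
  let expected := PySem.Str.join ""
      ((pvCampi.map (fun c => dd.getD c "")).filter (fun v => !(v == "-" || v == "/")))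
  let extracted := PySem.Str.replace (PySem.Str.replace codice_immagine "-" "") " " ""
  let status :=
    if PySem.Str.replace expected "O" "0" = PySem.Str.replace extracted "O" "0"
    then "OK" else "FAILED"
  [("titolo_documento", dd.get? "titolo"),
   ("codice_atteso", some expected),
   ("codice_estratto", some extracted),
   ("status", some status)]

-- ===== PRECONDITION & SPEC =====
def Spec_verifica_codici (codice_da_elenco : List (String × String)) (codice_immagine : String) (out : List (String × Option String)) : Prop := out = verifica_codici_alt codice_da_elenco codice_immagine
instance (codice_da_elenco : List (String × String)) (codice_immagine : String) (out : List (String × Option String)) : Decidable (Spec_verifica_codici codice_da_elenco codice_immagine out) := by unfold Spec_verifica_codici; infer_instance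

-- ===== CLAIM (what is proved, stated in full; the proofs are below) =====
def Claim_equal_verifica_codici : Prop := ∀ (codice_da_elenco : List (String × String)) (codice_immagine : String), Dom_verifica_codici codice_da_elenco codice_immagine → Spec_verifica_codici codice_da_elenco codice_immagine (verifica_codici codice_da_elenco codice_immagine)

-- ===== LEMMAS AND PROOFS =====

def pvNorm (c : Char) : Char := if c = 'O' then '0' else c

theorem pvNorm_eq_iff (a b : Char) :
    pvNorm a = pvNorm b ↔ (a = b ∨ (a = 'O' ∧ b = '0') ∨ (a = '0' ∧ b = 'O')) := by
  unfold pvNorm; split_ifs <;> simp_all [eq_comm]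

theorem pvReplace_go_eq (fuel : Nat) : ∀ (l acc : List Char), l.length ≤ fuel →
    PySem.Chars.replace.go ['O'] ['0'] fuel l acc = acc.reverse ++ l.map pvNorm := by
  induction fuel with
  | zero =>
    intro l acc h
    have : l = [] := List.eq_nil_of_length_eq_zero (Nat.le_zero.mp h)
    subst this; simp [PySem.Chars.replace.go]
  | succ n ih =>
    intro l acc h
    cases l with
    | nil => simp [PySem.Chars.replace.go]
    | cons c t =>
      by_cases hc : c = 'O'
      · subst hc
        have hp : List.isPrefixOf ['O'] ('O' :: t) = true := by simp [List.isPrefixOf]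
        simp only [PySem.Chars.replace.go, hp, if_pos]
        rw [show List.drop ['O'].length ('O' :: t) = t from rfl,
            show ['0'].reverse ++ acc = '0' :: acc from rfl]
        rw [ih t ('0' :: acc) (by simpa using Nat.succ_le_succ_iff.mp h)]
        simp [pvNorm]
      · have hp : List.isPrefixOf ['O'] (c :: t) = false := by
          simp [List.isPrefixOf]
          exact fun hh => hc hh.symm
        simp only [PySem.Chars.replace.go, hp]
        rw [if_neg (by simp)]
        rw [ih t (c :: acc) (by simpa using Nat.succ_le_succ_iff.mp h)]
        simp [pvNorm, hc]

theorem pvReplace_eq (cs : List Char) :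
    PySem.Chars.replace cs ['O'] ['0'] = cs.map pvNorm := by
  unfold PySem.Chars.replace
  rw [if_neg (by simp)]
  simpa using pvReplace_go_eq cs.length cs [] le_rfl

theorem pvFold_eq (g : String → String) (l : List String) (acc : List String) :
    l.foldl (fun acc campo =>
      let valore := g campo
      if valore = "-" ∨ valore = "/" then acc else acc ++ [valore]) acc
    = acc ++ (l.map g).filter (fun v => !(v == "-" || v == "/")) := by
  induction l generalizing acc with
  | nil => simp
  | cons x xs ih =>
    simp only [List.foldl_cons, List.map_cons, List.filter_cons]
    by_cases hx : g x = "-" ∨ g x = "/"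
    · rw [if_pos hx, ih]
      have : (!(g x == "-" || g x == "/")) = false := by
        rcases hx with h | h <;> simp [h]
      rw [this]; simp
    · rw [if_neg hx, ih]
      have : (!(g x == "-" || g x == "/")) = true := by
        push Not at hx; simp [hx.1, hx.2]
      rw [this]; simp

theorem pvLoop_eq (m : Nat) : ∀ (k : Nat) (se si : List Char),
    se.length = si.length → k + m = si.length →
    pvLoopA se si (PySem.List.pyRange (k : Int) (si.length : Int))
      = (if (se.drop k).map pvNorm = (si.drop k).map pvNorm then "OK" else "FAILED") := by
  induction m with
  | zero =>
    intro k se si hlen hk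
    have hk' : k = si.length := by omega
    subst hk'
    have : PySem.List.pyRange (si.length : Int) (si.length : Int) = [] := by
      simp [PySem.List.pyRange]
    rw [this]
    have h1 : se.drop si.length = [] := List.drop_eq_nil_of_le (le_of_eq hlen)
    simp [pvLoopA, h1]
  | succ n ih =>
    intro k se si hlen hk
    have hklt : k < si.length := by omega
    have hke : k < se.length := by omega
    rw [PySem.List.pyRange_one_cons (by exact_mod_cast hklt)]
    show pvLoopA se si ((k : Int) :: PySem.List.pyRange ((k : Int) + 1) (si.length : Int)) = _
    have hcast : ((k : Int) + 1) = ((k + 1 : Nat) : Int) := by push_cast; ring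
    have hse : PySem.List.pyGetD se (k : Int) ' ' = se[k] := by
      rw [PySem.List.pyGetD_natCast]; exact List.getD_eq_getElem se ' ' hke
    have hsi : PySem.List.pyGetD si (k : Int) ' ' = si[k] := by
      rw [PySem.List.pyGetD_natCast]; exact List.getD_eq_getElem si ' ' hklt
    have hdse : se.drop k = se[k] :: se.drop (k + 1) := (List.getElem_cons_drop hke).symm
    have hdsi : si.drop k = si[k] :: si.drop (k + 1) := (List.getElem_cons_drop hklt).symm
    have ihk := ih (k + 1) se si hlen (by omega)
    rw [hcast] at *
    simp only [pvLoopA, hse, hsi]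
    rw [hdse, hdsi]
    simp only [List.map_cons, List.cons.injEq]
    by_cases h1 : se[k] = si[k]
    · rw [if_pos h1, ihk]
      have : pvNorm se[k] = pvNorm si[k] := by rw [h1]
      simp [this]
    · rw [if_neg h1]
      by_cases h2 : (se[k] = 'O' ∧ si[k] = '0') ∨ (se[k] = '0' ∧ si[k] = 'O')
      · rw [if_pos h2, ihk]
        have : pvNorm se[k] = pvNorm si[k] := (pvNorm_eq_iff _ _).mpr (Or.inr h2)
        simp [this]
      · rw [if_neg h2]
        have : pvNorm se[k] ≠ pvNorm si[k] := by
          intro hc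
          rcases (pvNorm_eq_iff _ _).mp hc with h | h
          · exact h1 h
          · exact h2 h
        simp [this]

theorem pvStatus_eq (E X : String) :
    (if PySem.Str.len E ≠ PySem.Str.len X then "FAILED"
     else pvLoopA E.toList X.toList (PySem.List.pyRange 0 (PySem.Str.len X)))
    = (if PySem.Str.replace E "O" "0" = PySem.Str.replace X "O" "0" then "OK" else "FAILED") := by
  have hrep : ∀ s : String, (PySem.Str.replace s "O" "0").toList = s.toList.map pvNorm := by
    intro s
    rw [PySem.Str.toList_replace]
    exact pvReplace_eq s.toList
  have hiff : (PySem.Str.replace E "O" "0" = PySem.Str.replace X "O" "0")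
      ↔ E.toList.map pvNorm = X.toList.map pvNorm := by
    rw [← String.toList_inj, hrep, hrep]
  have hlen : ∀ s : String, PySem.Str.len s = (s.toList.length : Int) := by
    intro s; simp [PySem.Str.len]
  by_cases h : E.toList.length = X.toList.length
  · rw [if_neg (by rw [hlen, hlen]; exact_mod_cast not_not.mpr h)]
    have h0 : PySem.List.pyRange 0 ((X.toList.length : Nat) : Int)
        = PySem.List.pyRange ((0 : Nat) : Int) ((X.toList.length : Nat) : Int) := by norm_num
    rw [hlen]
    rw [h0]
    rw [pvLoop_eq X.toList.length 0 E.toList X.toList h (by omega)]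
    simp only [List.drop_zero]
    by_cases hm : E.toList.map pvNorm = X.toList.map pvNorm
    · rw [if_pos hm, if_pos (hiff.mpr hm)]
    · rw [if_neg hm, if_neg (fun hc => hm (hiff.mp hc))]
  · rw [if_pos (by rw [hlen, hlen]; exact_mod_cast h)]
    have : E.toList.map pvNorm ≠ X.toList.map pvNorm := by
      intro hc
      apply h
      have := congrArg List.length hc
      simpa using this
    rw [if_neg (fun hc => this (hiff.mp hc))]

-- ===== VERDICT (by name: the statement is the Claim_ definition above) =====
theorem verifica_codici_spec : Claim_equal_verifica_codici := by
  intro d s _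
  unfold Spec_verifica_codici verifica_codici verifica_codici_alt
  simp only
  rw [pvFold_eq]
  simp only [List.nil_append]
  rw [pvStatus_eq]
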